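-- pv_equiv track=rewrite | github.com/rxu0112/WR-CP | data_prepare/data_pemsd8.py | get_time_list
-- ===== SOURCE A (Python) =====
-- def get_time_list(start, end):
--     time_list = []
--     if start > end:
--         if end == 0:
--             for hour in range(start, 24):
--                 for minute in range(0, 60, 5):
--                     time_list.append(f'{hour:02d}:{minute:02d}:00')
--         else:
--             for hour in range(start, 24):
--                 for minute in range(0, 60, 5):
--                     time_list.append(f'{hour:02d}:{minute:02d}:00')
--             for hour in range(0, end):
--                 for minute in range(0, 60, 5):
--                     time_list.append(f'{hour:02d}:{minute:02d}:00')
--     else: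
--         for hour in range(start, end):
--             for minute in range(0, 60, 5):
--                 time_list.append(f'{hour:02d}:{minute:02d}:00')
--     return time_list
-- ===== SOURCE B (Python) =====
-- def get_time_list(start, end):
--     # Alternative: no hour enumeration — one flat pass over 5-minute slot indices,
--     # decoding each slot index k into its hour and minute arithmetically.
--     if start > end:
--         n1 = max(24 - start, 0)
--         total = n1 + max(end, 0)
--     else:
--         n1 = total = max(end - start, 0)
--     out = []
--     for k in range(12 * total):
--         j, r = divmod(k, 12)
--         h = start + j if j < n1 else j - n1
--         out.append(f'{h:02d}:{5*r:02d}:00')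
--     return out
-- ===== Notes on version B (the rewrite author's own statement) =====
-- stated objective: alternative
-- what changed: Replaces the three duplicated nested hour/minute loops by a single flat loop over 5-minute slot indices, decoding each index k arithmetically (divmod by 12) into its hour and minute instead of enumerating hour ranges.
import Mathlib
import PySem

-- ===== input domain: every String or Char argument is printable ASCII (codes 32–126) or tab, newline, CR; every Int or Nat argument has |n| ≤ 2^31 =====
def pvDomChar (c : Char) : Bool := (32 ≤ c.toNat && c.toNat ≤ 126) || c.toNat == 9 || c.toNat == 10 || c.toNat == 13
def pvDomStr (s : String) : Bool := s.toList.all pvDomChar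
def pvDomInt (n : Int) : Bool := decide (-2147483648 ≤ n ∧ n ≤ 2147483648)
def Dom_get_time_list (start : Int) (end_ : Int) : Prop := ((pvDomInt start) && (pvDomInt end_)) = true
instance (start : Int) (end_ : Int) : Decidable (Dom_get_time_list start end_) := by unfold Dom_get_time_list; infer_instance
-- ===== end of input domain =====

-- B replaces A's three duplicated nested hour/minute loops by one flat loop over
-- 5-minute slot indices, decoding each index arithmetically (divmod by 12).

-- shared helper: Python's f'{n:02d}' (zero-pad to width 2; exact for the widths reached here)
def pvPad2 (cs : List Char) : List Char := if cs.length < 2 then '0' :: cs else cs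
-- shared helper: f'{h:02d}:{m:02d}:00'
def pvTimeStr (h m : Int) : String :=
  String.ofList (pvPad2 (PySem.Int.toChars h) ++ ':' :: pvPad2 (PySem.Int.toChars m) ++ [':', '0', '0'])

-- ===== PORT A =====
def get_time_list (start : Int) (end_ : Int) : List String :=
  if start > end_ then
    if end_ = 0 then
      (PySem.List.pyRange start 24 1).foldl
        (fun acc h => (PySem.List.pyRange 0 60 5).foldl (fun a m => a ++ [pvTimeStr h m]) acc) []
    else
      let t :=
        (PySem.List.pyRange start 24 1).foldl
          (fun acc h => (PySem.List.pyRange 0 60 5).foldl (fun a m => a ++ [pvTimeStr h m]) acc) []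
      (PySem.List.pyRange 0 end_ 1).foldl
        (fun acc h => (PySem.List.pyRange 0 60 5).foldl (fun a m => a ++ [pvTimeStr h m]) acc) t
  else
    (PySem.List.pyRange start end_ 1).foldl
      (fun acc h => (PySem.List.pyRange 0 60 5).foldl (fun a m => a ++ [pvTimeStr h m]) acc) []

-- ===== PORT B =====
def get_time_list_alt (start : Int) (end_ : Int) : List String :=
  let n1 : Int := if start > end_ then max (24 - start) 0 else max (end_ - start) 0
  let total : Int := if start > end_ then n1 + max end_ 0 else n1
  (PySem.List.pyRange 0 (12 * total) 1).foldl
    (fun out k =>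
      let j := PySem.Int.floordiv k 12
      let r := PySem.Int.mod k 12
      let h := if j < n1 then start + j else j - n1
      out ++ [pvTimeStr h (5 * r)]) []

-- ===== PRECONDITION & SPEC =====
def Spec_get_time_list (start : Int) (end_ : Int) (out : List String) : Prop := out = get_time_list_alt start end_
instance (start : Int) (end_ : Int) (out : List String) : Decidable (Spec_get_time_list start end_ out) := by unfold Spec_get_time_list; infer_instance

-- ===== CLAIM (what is proved, stated in full; the proofs are below) =====
def Claim_equal_get_time_list : Prop := ∀ (start : Int) (end_ : Int), Dom_get_time_list start end_ → Spec_get_time_list start end_ (get_time_list start end_)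

-- ===== LEMMAS AND PROOFS =====

-- A's nested append-loop over a list of hours is a flatMap
theorem pv_foldNest (hs : List Int) (acc : List String) :
    hs.foldl (fun acc h => (PySem.List.pyRange 0 60 5).foldl (fun a m => a ++ [pvTimeStr h m]) acc) acc
      = acc ++ hs.flatMap (fun h => (PySem.List.pyRange 0 60 5).map (fun m => pvTimeStr h m)) := by
  induction hs generalizing acc with
  | nil => simp
  | cons h t ih =>
      rw [List.foldl_cons, PySem.List.foldl_append_singleton_eq_map, ih,
        List.flatMap_cons, List.append_assoc]

-- the 12 minute slots of one hour, both ways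
theorem pv_minutes (h : Int) :
    (List.range 12).map (fun r : ℕ => pvTimeStr h (5 * (r : Int)))
      = (PySem.List.pyRange 0 60 5).map (fun m => pvTimeStr h m) := by
  rw [show PySem.List.pyRange 0 60 5 = [0, 5, 10, 15, 20, 25, 30, 35, 40, 45, 50, 55] from by decide,
    show List.range 12 = [0,1,2,3,4,5,6,7,8,9,10,11] from by decide]
  norm_num [List.map]

-- B's flat slot pass over 12*H indices, decoded by divmod, is H hour blocks
theorem pv_slots (hf : Int → Int) (H : ℕ) :
    (PySem.List.pyRange 0 (12 * (H : Int)) 1).map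
      (fun k => pvTimeStr (hf (PySem.Int.floordiv k 12)) (5 * PySem.Int.mod k 12))
      = (List.range H).flatMap (fun j : ℕ => (PySem.List.pyRange 0 60 5).map (fun m => pvTimeStr (hf (j : Int)) m)) := by
  induction H with
  | zero => simp
  | succ n ih =>
      have hsplit := PySem.List.pyRange_one_append 0 (12 * (n : Int)) (12 * ((n+1 : ℕ) : Int))
        (by omega) (by push_cast; omega)
      rw [hsplit, List.map_append, ih, List.range_succ, List.flatMap_append]
      congr 1
      rw [PySem.List.pyRange_one (12 * (n : Int)) (12 * ((n+1 : ℕ) : Int)),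
        show (12 * ((n+1 : ℕ) : Int) - 12 * (n : Int)).toNat = 12 from by push_cast; omega,
        List.map_map, List.flatMap_cons, List.flatMap_nil, List.append_nil, ← pv_minutes (hf (n : Int))]
      apply List.map_congr_left
      intro r hr
      have hr12 : r < 12 := List.mem_range.mp hr
      have hd : PySem.Int.floordiv (12 * (n : Int) + (r : Int)) 12 = (n : Int) := by
        rw [PySem.Int.floordiv_eq_iff_of_pos (by omega)]
        constructor <;> omega
      have hm : PySem.Int.mod (12 * (n : Int) + (r : Int)) 12 = (r : Int) := by
        have := PySem.Int.floordiv_mul_add_mod (12 * (n : Int) + (r : Int)) 12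
        rw [hd] at this; omega
      simp only [Function.comp_apply]
      rw [hd, hm]

-- B's fold, normalised: a flatMap of hour blocks over indices 0..total-1
theorem pv_B_core (start n1 total : Int) (h0 : 0 ≤ total) :
    (PySem.List.pyRange 0 (12 * total) 1).foldl
      (fun out k =>
        let j := PySem.Int.floordiv k 12
        let r := PySem.Int.mod k 12
        let h := if j < n1 then start + j else j - n1
        out ++ [pvTimeStr h (5 * r)]) []
      = (List.range total.toNat).flatMap
          (fun j : ℕ => (PySem.List.pyRange 0 60 5).map
            (fun m => pvTimeStr (if (j : Int) < n1 then start + j else (j : Int) - n1) m)) := by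
  show (PySem.List.pyRange 0 (12 * total) 1).foldl
      (fun out k => out ++ [pvTimeStr
        (if PySem.Int.floordiv k 12 < n1 then start + PySem.Int.floordiv k 12
         else PySem.Int.floordiv k 12 - n1) (5 * PySem.Int.mod k 12)]) [] = _
  rw [PySem.List.foldl_append_singleton_eq_map, List.nil_append,
    show 12 * total = 12 * ((total.toNat : ℕ) : Int) from by omega]
  exact pv_slots (fun j => if j < n1 then start + j else j - n1) total.toNat

-- the slot-decoded hours of the wrap case are A's two hour ranges
theorem pv_hours_wrap (start end_ : Int) :
    (List.range (max (24 - start) 0 + max end_ 0).toNat).flatMap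
      (fun j : ℕ => (PySem.List.pyRange 0 60 5).map
        (fun m => pvTimeStr (if (j : Int) < max (24 - start) 0 then start + j
                             else (j : Int) - max (24 - start) 0) m))
      = (PySem.List.pyRange start 24 1 ++ PySem.List.pyRange 0 end_ 1).flatMap
          (fun h => (PySem.List.pyRange 0 60 5).map (fun m => pvTimeStr h m)) := by
  rw [Int.toNat_add (by omega) (by omega), List.range_add, List.flatMap_append,
    List.flatMap_append]
  congr 1
  · rw [PySem.List.pyRange_one start 24, List.flatMap_map,
      show (max (24 - start) 0).toNat = (24 - start).toNat from by omega]
    refine List.flatMap_congr (fun j hj => ?_)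
    have : j < (24 - start).toNat := List.mem_range.mp hj
    rw [if_pos (by omega)]
  · rw [PySem.List.pyRange_one 0 end_, List.flatMap_map, List.flatMap_map, sub_zero,
      show (max end_ 0).toNat = end_.toNat from by omega]
    refine List.flatMap_congr (fun i hi => ?_)
    rw [if_neg (by omega),
      show (((max (24 - start) 0).toNat + i : ℕ) : Int) - max (24 - start) 0 = 0 + (i : Int)
        from by omega]

-- the slot-decoded hours of the plain case are A's single hour range
theorem pv_hours_plain (start end_ : Int) :
    (List.range (max (end_ - start) 0).toNat).flatMap
      (fun j : ℕ => (PySem.List.pyRange 0 60 5).map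
        (fun m => pvTimeStr (if (j : Int) < max (end_ - start) 0 then start + j
                             else (j : Int) - max (end_ - start) 0) m))
      = (PySem.List.pyRange start end_ 1).flatMap
          (fun h => (PySem.List.pyRange 0 60 5).map (fun m => pvTimeStr h m)) := by
  rw [PySem.List.pyRange_one start end_, List.flatMap_map,
    show (end_ - start).toNat = (max (end_ - start) 0).toNat from by omega]
  refine List.flatMap_congr (fun j hj => ?_)
  have : j < (max (end_ - start) 0).toNat := List.mem_range.mp hj
  rw [if_pos (by omega)]

-- ===== VERDICT (by name: the statement is the Claim_ definition above) =====
theorem get_time_list_spec : Claim_equal_get_time_list := by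
  intro start end_ _
  unfold Spec_get_time_list get_time_list get_time_list_alt
  by_cases hgt : start > end_
  · simp only [if_pos hgt]
    rw [pv_B_core start (max (24 - start) 0) (max (24 - start) 0 + max end_ 0) (by omega),
      pv_hours_wrap]
    by_cases h0 : end_ = 0
    · subst h0
      rw [if_pos rfl, pv_foldNest,
        PySem.List.pyRange_one_eq_nil (by omega : (0:Int) ≤ 0)]
      simp
    · rw [if_neg h0, pv_foldNest, pv_foldNest]
      simp
  · simp only [if_neg hgt]
    rw [pv_B_core start (max (end_ - start) 0) (max (end_ - start) 0) (by omega),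
      pv_hours_plain, pv_foldNest]
    simp
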